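-- pv_equiv track=rewrite | github.com/feekha/ds2 | app.py | get_wd_sign
-- ===== SOURCE A (Python) =====
-- def get_wd_sign(wd_list):
--     '''
--     Bins wind directions
--     '''
--     wds = []
--     dirs = ['N', 'NE', 'E', 'SE', 'S', 'SW', 'W', 'NW'] # provides order for windrose
--     for wd in wd_list:
--         if wd > 337:
--             wds.append('\U00002B61') # N
--         elif wd > 292:
--             wds.append('\U00002B66') # NW
--         elif wd > 247:
--             wds.append('\U00002B60') # W
--         elif wd > 202:
--             wds.append('\U00002B69') # SW
--         elif wd > 157:
--             wds.append('\U00002B63') # S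
--         elif wd > 112:
--             wds.append('\U00002B68') # SE
--         elif wd > 67:
--             wds.append('\U00002B62') # E
--         elif wd > 22:
--             wds.append('\U00002B67') # NE
--         elif wd <= 22:
--             wds.append('\U00002B61') # N
--         elif wd in dirs:
--             wds.append(wd)
--     return wds, dirs
-- ===== SOURCE B (Python) =====
-- def _bisect_left(a, x):
--     lo, hi = 0, len(a)
--     while lo < hi:
--         mid = (lo + hi) // 2
--         if a[mid] < x:
--             lo = mid + 1
--         else:
--             hi = mid
--     return lo
--
-- _BOUNDS = [22, 67, 112, 157, 202, 247, 292, 337]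
-- _SYMBOLS = ['\u2B61', '\u2B67', '\u2B62', '\u2B68', '\u2B63',
--             '\u2B69', '\u2B60', '\u2B66', '\u2B61']
--
-- def get_wd_sign(wd_list):
--     '''
--     Bins wind directions
--     '''
--     dirs = ['N', 'NE', 'E', 'SE', 'S', 'SW', 'W', 'NW']
--     wds = [_SYMBOLS[_bisect_left(_BOUNDS, wd)] for wd in wd_list]
--     return wds, dirs
-- ===== Notes on version B (the rewrite author's own statement) =====
-- stated objective: idiomatic
-- what changed: Replaces the nine-branch if/elif chain with a sorted boundary table searched by a hand-written bisect_left (binary search) indexing a parallel symbol list, and builds wds with a list comprehension instead of repeated appends.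
import Mathlib
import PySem

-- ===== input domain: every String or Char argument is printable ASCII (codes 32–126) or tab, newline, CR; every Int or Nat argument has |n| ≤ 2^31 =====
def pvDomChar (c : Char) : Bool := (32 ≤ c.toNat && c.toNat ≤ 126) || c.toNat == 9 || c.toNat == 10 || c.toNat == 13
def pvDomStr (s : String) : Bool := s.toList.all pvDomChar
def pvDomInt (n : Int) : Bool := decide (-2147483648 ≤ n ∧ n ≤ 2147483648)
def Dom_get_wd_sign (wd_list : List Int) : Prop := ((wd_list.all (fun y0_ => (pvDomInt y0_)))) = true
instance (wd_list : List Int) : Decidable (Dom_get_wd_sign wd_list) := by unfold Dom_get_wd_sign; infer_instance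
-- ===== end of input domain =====

-- B replaces A's nine-branch if/elif chain by a binary search (bisect_left) over a
-- sorted boundary table indexing a parallel symbol list; objective: idiomatic.


-- ===== PORT A =====
-- Literal port of A: fold over wd_list appending via the if/elif chain.
-- The final 'elif wd in dirs' branch is unreachable (preceded by 'elif wd <= 22',
-- which exhausts the ints); ported as the else-branch appending nothing.
def get_wd_sign (wd_list : List Int) : List String × List String :=
  let dirs : List String := ["N", "NE", "E", "SE", "S", "SW", "W", "NW"]
  let wds : List String :=
    wd_list.foldl (fun wds wd =>
      if wd > 337 then wds ++ ["⭡"]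
      else if wd > 292 then wds ++ ["⭦"]
      else if wd > 247 then wds ++ ["⭠"]
      else if wd > 202 then wds ++ ["⭩"]
      else if wd > 157 then wds ++ ["⭣"]
      else if wd > 112 then wds ++ ["⭨"]
      else if wd > 67 then wds ++ ["⭢"]
      else if wd > 22 then wds ++ ["⭧"]
      else if wd ≤ 22 then wds ++ ["⭡"]
      else wds) []
  (wds, dirs)

-- ===== PORT B =====
-- Source B's hand-written bisect_left: binary search for the insertion point.
def pvBisectLeft (a : List Int) (x : Int) (lo hi : Nat) : Nat :=
  if lo < hi then
    let mid := (lo + hi) / 2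
    if a.getD mid 0 < x then pvBisectLeft a x (mid + 1) hi
    else pvBisectLeft a x lo mid
  else lo
termination_by hi - lo
decreasing_by all_goals omega

def pvBounds : List Int := [22, 67, 112, 157, 202, 247, 292, 337]
def pvSymbols : List String := ["⭡", "⭧", "⭢", "⭨", "⭣", "⭩", "⭠", "⭦", "⭡"]

def get_wd_sign_alt (wd_list : List Int) : List String × List String :=
  let dirs : List String := ["N", "NE", "E", "SE", "S", "SW", "W", "NW"]
  let wds : List String :=
    wd_list.map (fun wd => pvSymbols.getD (pvBisectLeft pvBounds wd 0 pvBounds.length) "")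
  (wds, dirs)

-- ===== PRECONDITION & SPEC =====
def Spec_get_wd_sign (wd_list : List Int) (out : List String × List String) : Prop := out = get_wd_sign_alt wd_list
instance (wd_list : List Int) (out : List String × List String) : Decidable (Spec_get_wd_sign wd_list out) := by unfold Spec_get_wd_sign; infer_instance

-- ===== CLAIM (what is proved, stated in full; the proofs are below) =====
def Claim_equal_get_wd_sign : Prop := ∀ (wd_list : List Int), Dom_get_wd_sign wd_list → Spec_get_wd_sign wd_list (get_wd_sign wd_list)

-- ===== LEMMAS AND PROOFS =====

-- unfolding lemmas for the binary search (kept small so kernel replay is cheap)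
theorem bl_step (a : List Int) (x : Int) (lo hi : Nat) (h : lo < hi) :
    pvBisectLeft a x lo hi =
      if a.getD ((lo + hi) / 2) 0 < x then pvBisectLeft a x ((lo + hi) / 2 + 1) hi
      else pvBisectLeft a x lo ((lo + hi) / 2) := by
  rw [pvBisectLeft.eq_def]
  simp only [if_pos h]

theorem bl_stop (a : List Int) (x : Int) (lo hi : Nat) (h : ¬ lo < hi) :
    pvBisectLeft a x lo hi = lo := by
  rw [pvBisectLeft.eq_def]
  simp only [if_neg h]

-- per-element agreement of the two binning rules
theorem pv_elem (wd : Int) :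
    (if wd > 337 then "⭡"
     else if wd > 292 then "⭦"
     else if wd > 247 then "⭠"
     else if wd > 202 then "⭩"
     else if wd > 157 then "⭣"
     else if wd > 112 then "⭨"
     else if wd > 67 then "⭢"
     else if wd > 22 then "⭧"
     else "⭡")
    = pvSymbols.getD (pvBisectLeft pvBounds wd 0 pvBounds.length) "" := by
  show _ = pvSymbols.getD (pvBisectLeft pvBounds wd 0 8) ""
  split_ifs with h1 h2 h3 h4 h5 h6 h7 h8
  · rw [bl_step _ _ _ _ (by decide), if_pos (show pvBounds.getD _ 0 < wd by change (202:Int) < wd; omega)]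
    rw [bl_step _ _ _ _ (by decide), if_pos (show pvBounds.getD _ 0 < wd by change (292:Int) < wd; omega)]
    rw [bl_step _ _ _ _ (by decide), if_pos (show pvBounds.getD _ 0 < wd by change (337:Int) < wd; omega)]
    rw [bl_stop _ _ _ _ (by decide)]
    rfl

  · rw [bl_step _ _ _ _ (by decide), if_pos (show pvBounds.getD _ 0 < wd by change (202:Int) < wd; omega)]
    rw [bl_step _ _ _ _ (by decide), if_pos (show pvBounds.getD _ 0 < wd by change (292:Int) < wd; omega)]
    rw [bl_step _ _ _ _ (by decide), if_neg (show ¬ pvBounds.getD _ 0 < wd by change ¬ (337:Int) < wd; omega)]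
    rw [bl_stop _ _ _ _ (by decide)]
    rfl

  · rw [bl_step _ _ _ _ (by decide), if_pos (show pvBounds.getD _ 0 < wd by change (202:Int) < wd; omega)]
    rw [bl_step _ _ _ _ (by decide), if_neg (show ¬ pvBounds.getD _ 0 < wd by change ¬ (292:Int) < wd; omega)]
    rw [bl_step _ _ _ _ (by decide), if_pos (show pvBounds.getD _ 0 < wd by change (247:Int) < wd; omega)]
    rw [bl_stop _ _ _ _ (by decide)]
    rfl

  · rw [bl_step _ _ _ _ (by decide), if_pos (show pvBounds.getD _ 0 < wd by change (202:Int) < wd; omega)]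
    rw [bl_step _ _ _ _ (by decide), if_neg (show ¬ pvBounds.getD _ 0 < wd by change ¬ (292:Int) < wd; omega)]
    rw [bl_step _ _ _ _ (by decide), if_neg (show ¬ pvBounds.getD _ 0 < wd by change ¬ (247:Int) < wd; omega)]
    rw [bl_stop _ _ _ _ (by decide)]
    rfl

  · rw [bl_step _ _ _ _ (by decide), if_neg (show ¬ pvBounds.getD _ 0 < wd by change ¬ (202:Int) < wd; omega)]
    rw [bl_step _ _ _ _ (by decide), if_pos (show pvBounds.getD _ 0 < wd by change (112:Int) < wd; omega)]
    rw [bl_step _ _ _ _ (by decide), if_pos (show pvBounds.getD _ 0 < wd by change (157:Int) < wd; omega)]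
    rw [bl_stop _ _ _ _ (by decide)]
    rfl

  · rw [bl_step _ _ _ _ (by decide), if_neg (show ¬ pvBounds.getD _ 0 < wd by change ¬ (202:Int) < wd; omega)]
    rw [bl_step _ _ _ _ (by decide), if_pos (show pvBounds.getD _ 0 < wd by change (112:Int) < wd; omega)]
    rw [bl_step _ _ _ _ (by decide), if_neg (show ¬ pvBounds.getD _ 0 < wd by change ¬ (157:Int) < wd; omega)]
    rw [bl_stop _ _ _ _ (by decide)]
    rfl

  · rw [bl_step _ _ _ _ (by decide), if_neg (show ¬ pvBounds.getD _ 0 < wd by change ¬ (202:Int) < wd; omega)]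
    rw [bl_step _ _ _ _ (by decide), if_neg (show ¬ pvBounds.getD _ 0 < wd by change ¬ (112:Int) < wd; omega)]
    rw [bl_step _ _ _ _ (by decide), if_pos (show pvBounds.getD _ 0 < wd by change (67:Int) < wd; omega)]
    rw [bl_stop _ _ _ _ (by decide)]
    rfl

  · rw [bl_step _ _ _ _ (by decide), if_neg (show ¬ pvBounds.getD _ 0 < wd by change ¬ (202:Int) < wd; omega)]
    rw [bl_step _ _ _ _ (by decide), if_neg (show ¬ pvBounds.getD _ 0 < wd by change ¬ (112:Int) < wd; omega)]
    rw [bl_step _ _ _ _ (by decide), if_neg (show ¬ pvBounds.getD _ 0 < wd by change ¬ (67:Int) < wd; omega)]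
    rw [bl_step _ _ _ _ (by decide), if_pos (show pvBounds.getD _ 0 < wd by change (22:Int) < wd; omega)]
    rw [bl_stop _ _ _ _ (by decide)]
    rfl

  · rw [bl_step _ _ _ _ (by decide), if_neg (show ¬ pvBounds.getD _ 0 < wd by change ¬ (202:Int) < wd; omega)]
    rw [bl_step _ _ _ _ (by decide), if_neg (show ¬ pvBounds.getD _ 0 < wd by change ¬ (112:Int) < wd; omega)]
    rw [bl_step _ _ _ _ (by decide), if_neg (show ¬ pvBounds.getD _ 0 < wd by change ¬ (67:Int) < wd; omega)]
    rw [bl_step _ _ _ _ (by decide), if_neg (show ¬ pvBounds.getD _ 0 < wd by change ¬ (22:Int) < wd; omega)]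
    rw [bl_stop _ _ _ _ (by decide)]
    rfl

-- one fold step appends exactly B's symbol
theorem pv_step (acc : List String) (wd : Int) :
    (if wd > 337 then acc ++ ["⭡"]
     else if wd > 292 then acc ++ ["⭦"]
     else if wd > 247 then acc ++ ["⭠"]
     else if wd > 202 then acc ++ ["⭩"]
     else if wd > 157 then acc ++ ["⭣"]
     else if wd > 112 then acc ++ ["⭨"]
     else if wd > 67 then acc ++ ["⭢"]
     else if wd > 22 then acc ++ ["⭧"]
     else if wd ≤ 22 then acc ++ ["⭡"]
     else acc)
    = acc ++ [pvSymbols.getD (pvBisectLeft pvBounds wd 0 pvBounds.length) ""] := by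
  rw [← pv_elem wd]
  split_ifs <;> first | rfl | omega

theorem pv_fold (l : List Int) (acc : List String) :
    l.foldl (fun wds wd =>
      if wd > 337 then wds ++ ["⭡"]
      else if wd > 292 then wds ++ ["⭦"]
      else if wd > 247 then wds ++ ["⭠"]
      else if wd > 202 then wds ++ ["⭩"]
      else if wd > 157 then wds ++ ["⭣"]
      else if wd > 112 then wds ++ ["⭨"]
      else if wd > 67 then wds ++ ["⭢"]
      else if wd > 22 then wds ++ ["⭧"]
      else if wd ≤ 22 then wds ++ ["⭡"]
      else wds) acc
    = acc ++ l.map (fun wd => pvSymbols.getD (pvBisectLeft pvBounds wd 0 pvBounds.length) "") := by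
  induction l generalizing acc with
  | nil => simp
  | cons h t ih =>
    simp only [List.foldl_cons, List.map_cons]
    rw [pv_step, ih, List.append_assoc, List.singleton_append]

-- ===== VERDICT (by name: the statement is the Claim_ definition above) =====
theorem get_wd_sign_spec : Claim_equal_get_wd_sign := by
  intro l _
  unfold Spec_get_wd_sign get_wd_sign get_wd_sign_alt
  simp only [pv_fold, List.nil_append]
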